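-- pv_equiv track=rewrite | github.com/jzisheng/interview-questions | lc/dp/minSumStairsWithHops/minSumStairsWithHops.py | minSumStairsWithHops
-- ===== SOURCE A (Python) =====
-- def minSumStairsWithHops(steps, k):
--     memo = {}
--
--     def f(idx):
--         if idx in memo:
--             return memo[idx]
--         elif idx >= len(steps):
--             return 0
--         else:
--             res = []
--             currCost = steps[idx]
--             for ns in range(1, k+1):
--                 res.append(currCost+f(idx+ns))
--             memo[idx] = min(res)
--             return memo[idx]
--
--     return f(0)
-- ===== SOURCE B (Python) =====
-- def minSumStairsWithHops(steps, k):
--     # Bottom-up DP with a monotonic-deque sliding-window minimum: O(n) instead of O(n*k).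
--     n = len(steps)
--     dp = [0] * (n + 1)          # dp[n] = 0 (past the stairs); dp[i] filled right-to-left
--     dq = []                     # indices j with dp-values increasing front-to-back; dq[head] is argmin
--     head = 0
--     for i in range(n - 1, -1, -1):
--         j = i + 1               # index entering the window [i+1, i+k]
--         while len(dq) > head and dp[dq[-1]] >= dp[j]:
--             dq.pop()
--         dq.append(j)
--         if dq[head] > i + k:    # index i+k+1 just left the window
--             head += 1
--         dp[i] = steps[i] + dp[dq[head]]
--     return dp[0]
-- ===== Notes on version B (the rewrite author's own statement) =====
-- stated objective: faster
-- what changed: Replaced A's memoized top-down recursion (dict + min over k candidate hops per index) by a bottom-up DP that sweeps the stairs once right-to-left and maintains the sliding-window minimum of the next k dp values with a monotonic deque (head pointer + amortized O(1) pops), so the inner k-wide min scan disappears.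
-- outside the precondition, e.g. on minSumStairsWithHops([5, 2], 0): A raises ValueError, B raises IndexError
import Mathlib
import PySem

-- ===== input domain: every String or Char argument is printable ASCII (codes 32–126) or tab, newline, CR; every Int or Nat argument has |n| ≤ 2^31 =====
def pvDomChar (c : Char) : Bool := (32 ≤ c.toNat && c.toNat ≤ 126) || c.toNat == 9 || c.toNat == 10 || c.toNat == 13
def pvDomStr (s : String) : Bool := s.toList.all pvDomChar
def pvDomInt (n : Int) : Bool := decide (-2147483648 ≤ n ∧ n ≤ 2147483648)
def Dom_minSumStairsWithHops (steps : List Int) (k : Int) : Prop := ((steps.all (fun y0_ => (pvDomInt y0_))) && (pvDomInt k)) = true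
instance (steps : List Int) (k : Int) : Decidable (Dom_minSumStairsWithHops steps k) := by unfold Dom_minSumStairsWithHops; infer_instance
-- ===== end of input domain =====

-- B replaces A's memoized O(n·k) top-down recursion by a bottom-up DP with a
-- monotonic-deque sliding-window minimum (O(n)); same return value on Pre_.

-- ===== PORT A =====
-- f(idx): memo dict threaded through; the Nat fuel only makes the recursion structural
-- (the wrapper passes steps.length + 1, which is never exhausted: idx grows by ≥ 1 per call).
def pvAf (steps : List Int) (k : Int) : Nat → Int → PySem.Dict Int Int → Int × PySem.Dict Int Int
  | 0, _idx, memo => (0, memo)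
  | fuel+1, idx, memo =>
    match memo.get? idx with
    | some v => (v, memo)
    | none =>
      if (steps.length : Int) ≤ idx then (0, memo)
      else
        let currCost := PySem.List.pyGetD steps idx 0
        let rm := (PySem.List.pyRange 1 (k+1) 1).foldl
          (fun (acc : List Int × PySem.Dict Int Int) ns =>
            let r := pvAf steps k fuel (idx + ns) acc.2
            (acc.1 ++ [currCost + r.1], r.2))
          ([], memo)
        match PySem.List.min? rm.1 (fun x => x) with
        | some m => (m, rm.2.insert idx m)
        | none => (0, rm.2)   -- Python: min([]) raises ValueError (k ≤ 0, steps ≠ []); excluded by Pre_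

def minSumStairsWithHops (steps : List Int) (k : Int) : Int :=
  (pvAf steps k (steps.length + 1) 0 PySem.Dict.empty).1

-- ===== PORT B =====
-- the 'while len(dq) > head and dp[dq[-1]] >= dp[j]: dq.pop()' loop of Source B;
-- the Nat fuel (called with dq.length) only makes the loop structural — each pop shortens dq.
def pvPopBack (dp : List Int) (head : Nat) (j : Int) : Nat → List Int → List Int
  | 0, dq => dq
  | fl+1, dq =>
    if head < dq.length ∧
        PySem.List.pyGetD dp j 0 ≤ PySem.List.pyGetD dp (PySem.List.pyGetD dq (-1) 0) 0 then
      pvPopBack dp head j fl dq.dropLast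
    else dq

-- one iteration of Source B's 'for i in range(n-1, -1, -1)' loop; state (dp, dq, head)
-- (head : Nat — Source B's head is a list index that starts at 0 and only grows).
def pvStep (steps : List Int) (k : Int) (s : List Int × List Int × Nat) (i : Int) :
    List Int × List Int × Nat :=
  let j := i + 1
  let dq := pvPopBack s.1 s.2.2 j s.2.1.length s.2.1 ++ [j]
  let head := if i + k < PySem.List.pyGetD dq (s.2.2 : Int) 0 then s.2.2 + 1 else s.2.2
  let dp := PySem.List.pySetD s.1 i
      (PySem.List.pyGetD steps i 0 + PySem.List.pyGetD s.1 (PySem.List.pyGetD dq (head : Int) 0) 0)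
  (dp, dq, head)

def minSumStairsWithHops_alt (steps : List Int) (k : Int) : Int :=
  let n := steps.length
  let dp := List.replicate (n + 1) (0 : Int)
  let s := (PySem.List.pyRange ((n : Int) - 1) (-1) (-1)).foldl (pvStep steps k) (dp, [], 0)
  PySem.List.pyGetD s.1 0 0

-- ===== PRECONDITION & SPEC =====
-- On steps ≠ [] with k ≤ 0 Python A raises ValueError (min of the empty res list); Pre_ excludes exactly that.
def Pre_minSumStairsWithHops (steps : List Int) (k : Int) : Prop := steps = [] ∨ 1 ≤ k
instance (steps : List Int) (k : Int) : Decidable (Pre_minSumStairsWithHops steps k) := by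
  unfold Pre_minSumStairsWithHops; infer_instance
def pvWitness_minSumStairsWithHops : List Int × Int := ([3, 1, -2, 7, 4], 2)
def Spec_minSumStairsWithHops (steps : List Int) (k : Int) (out : Int) : Prop := out = minSumStairsWithHops_alt steps k
instance (steps : List Int) (k : Int) (out : Int) : Decidable (Spec_minSumStairsWithHops steps k out) := by unfold Spec_minSumStairsWithHops; infer_instance

-- ===== CLAIM (what is proved, stated in full; the proofs are below) =====
def Claim_equal_minSumStairsWithHops : Prop := ∀ (steps : List Int) (k : Int), Dom_minSumStairsWithHops steps k → Pre_minSumStairsWithHops steps k → Spec_minSumStairsWithHops steps k (minSumStairsWithHops steps k)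

-- ===== LEMMAS AND PROOFS =====

-- min of a nonempty list, as Python's min(res) computes it
def pvMinNE : List Int → Int
  | [] => 0
  | x :: xs => xs.foldl min x

-- the common reference value: dp[i] = steps[i] + min(dp[i+1..i+k]), dp[i] = 0 for i ≥ len
def pvD (steps : List Int) (K : Nat) (i : Int) : Int :=
  if _h : 0 ≤ i ∧ i < (steps.length : Int) then
    PySem.List.pyGetD steps i 0 +
      pvMinNE ((List.range K).map (fun (d : Nat) => pvD steps K (i + 1 + (d : Int))))
  else 0
termination_by ((steps.length : Int) - i).toNat
decreasing_by simp_wf; omega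

lemma pv_foldl_min_le_init : ∀ (l : List Int) (a : Int), l.foldl min a ≤ a := by
  intro l
  induction l with
  | nil => simp
  | cons x l ih =>
    intro a
    calc (x :: l).foldl min a = l.foldl min (min a x) := rfl
      _ ≤ min a x := ih _
      _ ≤ a := min_le_left _ _

lemma pv_foldl_min_le_mem : ∀ (l : List Int) (a x : Int), x ∈ l → l.foldl min a ≤ x := by
  intro l
  induction l with
  | nil => simp
  | cons y l ih =>
    intro a x hx
    rcases List.mem_cons.1 hx with rfl | hx
    · calc (x :: l).foldl min a = l.foldl min (min a x) := rfl
        _ ≤ min a x := pv_foldl_min_le_init _ _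
        _ ≤ x := min_le_right _ _
    · exact ih _ _ hx

lemma pv_foldl_min_mem : ∀ (l : List Int) (a : Int), l.foldl min a = a ∨ l.foldl min a ∈ l := by
  intro l
  induction l with
  | nil => intro a; left; rfl
  | cons y l ih =>
    intro a
    rcases ih (min a y) with h | h
    · rcases min_choice a y with hc | hc
      · left; rw [List.foldl_cons, h, hc]
      · right; rw [List.foldl_cons, h, hc]; exact List.mem_cons_self
    · right; exact List.mem_cons_of_mem _ h

lemma pvMinNE_le (l : List Int) (x : Int) (hx : x ∈ l) : pvMinNE l ≤ x := by
  cases l with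
  | nil => cases hx
  | cons y l =>
    rcases List.mem_cons.1 hx with rfl | hx
    · exact pv_foldl_min_le_init _ _
    · exact pv_foldl_min_le_mem _ _ _ hx

lemma pvMinNE_mem (l : List Int) (h : l ≠ []) : pvMinNE l ∈ l := by
  cases l with
  | nil => exact absurd rfl h
  | cons y l =>
    rcases pv_foldl_min_mem l y with h' | h'
    · show l.foldl min y ∈ _
      rw [h']; exact List.mem_cons_self
    · exact List.mem_cons_of_mem _ h'

lemma pvMinNE_eq (l : List Int) (m : Int) (hm : m ∈ l) (hle : ∀ x ∈ l, m ≤ x) : pvMinNE l = m :=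
  le_antisymm (pvMinNE_le l m hm) (hle _ (pvMinNE_mem l (List.ne_nil_of_mem hm)))

lemma pv_foldl_min_map_add (c : Int) :
    ∀ (l : List Int) (a : Int), (l.map (fun v => c + v)).foldl min (c + a) = c + l.foldl min a := by
  intro l
  induction l with
  | nil => intro a; rfl
  | cons y l ih =>
    intro a
    calc ((y :: l).map (fun v => c + v)).foldl min (c + a)
        = (l.map (fun v => c + v)).foldl min (min (c + a) (c + y)) := rfl
      _ = (l.map (fun v => c + v)).foldl min (c + min a y) := by rw [min_add_add_left]
      _ = c + l.foldl min (min a y) := ih _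
      _ = c + (y :: l).foldl min a := rfl

lemma pvMinNE_map_add (c : Int) (l : List Int) (h : l ≠ []) :
    pvMinNE (l.map (fun v => c + v)) = c + pvMinNE l := by
  cases l with
  | nil => exact absurd rfl h
  | cons y l => exact pv_foldl_min_map_add c l y

lemma pvMin?_eq (l : List Int) (h : l ≠ []) :
    PySem.List.min? l (fun x => x) = some (pvMinNE l) := by
  cases l with
  | nil => exact absurd rfl h
  | cons y l => exact PySem.List.min?_id_cons (x := y) (t := l)

lemma pvD_zero_of_ge (steps : List Int) (K : Nat) (i : Int) (h : (steps.length : Int) ≤ i) :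
    pvD steps K i = 0 := by
  rw [pvD, dif_neg (by omega)]

-- ----- A-side -----
def pvGood (steps : List Int) (k : Int) (memo : PySem.Dict Int Int) : Prop :=
  ∀ i v, memo.get? i = some v → v = pvD steps k.toNat i

lemma pvA_fold (steps : List Int) (k : Int) (fuel : Nat) (idx currCost : Int)
    (IH : ∀ (idx' : Int) (memo : PySem.Dict Int Int), pvGood steps k memo → 0 ≤ idx' →
        (((steps.length : Int) + 1 - idx').toNat ≤ fuel) →
        (pvAf steps k fuel idx' memo).1 = pvD steps k.toNat idx' ∧
          pvGood steps k (pvAf steps k fuel idx' memo).2)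
    (h0 : 0 ≤ idx) (hfuel : ((steps.length : Int) + 1 - idx).toNat ≤ fuel + 1) :
    ∀ (ds : List Nat) (acc : List Int) (memo : PySem.Dict Int Int), pvGood steps k memo →
      (ds.foldl (fun (acc : List Int × PySem.Dict Int Int) (d : Nat) =>
          let r := pvAf steps k fuel (idx + (1 + (d : Int))) acc.2
          (acc.1 ++ [currCost + r.1], r.2)) (acc, memo)).1
        = acc ++ ds.map (fun (d : Nat) => currCost + pvD steps k.toNat (idx + (1 + (d : Int)))) ∧
      pvGood steps k ((ds.foldl (fun (acc : List Int × PySem.Dict Int Int) (d : Nat) =>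
          let r := pvAf steps k fuel (idx + (1 + (d : Int))) acc.2
          (acc.1 ++ [currCost + r.1], r.2)) (acc, memo)).2) := by
  intro ds
  induction ds with
  | nil => intro acc memo hg; exact ⟨by simp, hg⟩
  | cons d ds ih =>
    intro acc memo hg
    have hr := IH (idx + (1 + (d : Int))) memo hg (by omega) (by omega)
    rw [List.foldl_cons]
    have := ih (acc ++ [currCost + (pvAf steps k fuel (idx + (1 + (d : Int))) memo).1])
      (pvAf steps k fuel (idx + (1 + (d : Int))) memo).2 hr.2
    refine ⟨?_, this.2⟩
    rw [this.1, hr.1, List.map_cons, List.append_assoc, List.singleton_append]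

lemma pvA_main (steps : List Int) (k : Int) (hk : 1 ≤ k) :
    ∀ (fuel : Nat) (idx : Int) (memo : PySem.Dict Int Int), pvGood steps k memo → 0 ≤ idx →
      (((steps.length : Int) + 1 - idx).toNat ≤ fuel) →
      (pvAf steps k fuel idx memo).1 = pvD steps k.toNat idx ∧
        pvGood steps k (pvAf steps k fuel idx memo).2 := by
  intro fuel
  induction fuel with
  | zero =>
    intro idx memo hg h0 hfuel
    exact ⟨(pvD_zero_of_ge steps k.toNat idx (by omega)).symm, hg⟩
  | succ fuel ih =>
    intro idx memo hg h0 hfuel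
    rcases hmg : memo.get? idx with _ | v
    · by_cases hge : (steps.length : Int) ≤ idx
      · simp only [pvAf, hmg, if_pos hge]
        exact ⟨(pvD_zero_of_ge steps k.toNat idx hge).symm, hg⟩
      · simp only [pvAf, hmg, if_neg hge]
        rw [PySem.List.pyRange_one]
        have hk1 : (k + 1 - 1).toNat = k.toNat := by omega
        rw [hk1, List.foldl_map]
        have hfold := pvA_fold steps k fuel idx (PySem.List.pyGetD steps idx 0) ih h0 hfuel
          (List.range k.toNat) [] memo hg
        rw [hfold.1, List.nil_append]
        have hne2 : (List.range k.toNat).map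
            (fun (d : Nat) => pvD steps k.toNat (idx + 1 + (d : Int))) ≠ [] := by
          intro hcon
          have := congrArg List.length hcon
          simp at this
          omega
        have hmapeq : (List.range k.toNat).map
              (fun (d : Nat) => PySem.List.pyGetD steps idx 0 + pvD steps k.toNat (idx + (1 + (d : Int))))
            = ((List.range k.toNat).map (fun (d : Nat) => pvD steps k.toNat (idx + 1 + (d : Int)))).map
              (fun v => PySem.List.pyGetD steps idx 0 + v) := by
          rw [List.map_map]
          apply List.map_congr_left
          intro d _
          have : idx + (1 + (d : Int)) = idx + 1 + (d : Int) := by ring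
          simp [Function.comp, this]
        have hmin : PySem.List.min? ((List.range k.toNat).map
              (fun (d : Nat) => PySem.List.pyGetD steps idx 0 + pvD steps k.toNat (idx + (1 + (d : Int)))))
              (fun x => x)
            = some (PySem.List.pyGetD steps idx 0 +
                pvMinNE ((List.range k.toNat).map (fun (d : Nat) => pvD steps k.toNat (idx + 1 + (d : Int))))) := by
          rw [hmapeq, pvMin?_eq _ (by simpa using hne2), pvMinNE_map_add _ _ hne2]
        rw [hmin]
        have hval : PySem.List.pyGetD steps idx 0 +
            pvMinNE ((List.range k.toNat).map (fun (d : Nat) => pvD steps k.toNat (idx + 1 + (d : Int))))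
            = pvD steps k.toNat idx := by
          rw [pvD, dif_pos ⟨h0, by omega⟩]
        refine ⟨hval, ?_⟩
        intro i v hv
        rw [PySem.Dict.get?_insert] at hv
        split_ifs at hv with hi
        · cases hv; rw [hi]; exact hval
        · exact hfold.2 i v hv
    · simp only [pvAf, hmg]
      exact ⟨hg idx v hmg, hg⟩

lemma pvA_eq (steps : List Int) (k : Int) (hk : 1 ≤ k) :
    minSumStairsWithHops steps k = pvD steps k.toNat 0 := by
  have hg : pvGood steps k PySem.Dict.empty := by
    intro i v hv
    rw [PySem.Dict.get?_empty] at hv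
    cases hv
  exact (pvA_main steps k hk (steps.length + 1) 0 PySem.Dict.empty hg le_rfl (by omega)).1

lemma pvA_nil (k : Int) : minSumStairsWithHops [] k = 0 := by
  simp [minSumStairsWithHops, pvAf, PySem.Dict.get?_empty]

-- ----- B-side -----
-- the pop loop acting on the live part (dq.drop head) only
def pvPopT (g : Int → Int) (vj : Int) : List Int → List Int
  | [] => []
  | x :: tl =>
    if vj ≤ g ((x :: tl).getLast (by simp)) then pvPopT g vj (x :: tl).dropLast else x :: tl
termination_by tl => tl.length
decreasing_by simp

def pvInv (steps : List Int) (k : Int) (t : Int) (s : List Int × List Int × Nat) : Prop :=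
  s.1.length = steps.length + 1 ∧
  (∀ j : Int, t ≤ j → j ≤ (steps.length : Int) → PySem.List.pyGetD s.1 j 0 = pvD steps k.toNat j) ∧
  s.2.2 ≤ s.2.1.length ∧
  (∀ e ∈ s.2.1.drop s.2.2, t + 1 ≤ e ∧ e ≤ t + k ∧ e ≤ (steps.length : Int)) ∧
  (s.2.1.drop s.2.2).Pairwise (fun a b => b < a ∧ pvD steps k.toNat a < pvD steps k.toNat b) ∧
  (∀ j : Int, t + 1 ≤ j → j ≤ t + k → j ≤ (steps.length : Int) →
    ∃ e ∈ s.2.1.drop s.2.2, e ≤ j ∧ pvD steps k.toNat e ≤ pvD steps k.toNat j)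

lemma pvPopBack_stop (dp : List Int) (j : Int) (head : Nat) (fuel : Nat) (dq : List Int)
    (h : ¬ head < dq.length) : pvPopBack dp head j fuel dq = dq := by
  cases fuel with
  | zero => rfl
  | succ fl => simp [pvPopBack, h]

lemma pvPopBack_eq (dp : List Int) (j : Int) :
    ∀ (fl : Nat) (post pre : List Int), post.length ≤ fl →
      pvPopBack dp pre.length j (fl + pre.length) (pre ++ post) =
        pre ++ pvPopT (fun e => PySem.List.pyGetD dp e 0) (PySem.List.pyGetD dp j 0) post := by
  intro fl
  induction fl with
  | zero =>
    intro post pre hlen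
    have : post = [] := List.eq_nil_of_length_eq_zero (Nat.le_zero.1 hlen)
    subst this
    rw [List.append_nil, pvPopT, List.append_nil]
    exact pvPopBack_stop dp j pre.length (0 + pre.length) pre (by omega)
  | succ fl ih =>
    intro post pre hlen
    cases post with
    | nil =>
      rw [List.append_nil, pvPopT, List.append_nil]
      exact pvPopBack_stop dp j pre.length (fl + 1 + pre.length) pre (by omega)
    | cons x tl =>
      have hne : x :: tl ≠ [] := by simp
      have hlast : PySem.List.pyGetD (pre ++ x :: tl) (-1) 0 = (x :: tl).getLast hne := by
        rw [PySem.List.pyGetD_neg_one (pre ++ x :: tl) 0 (by simp)]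
        exact List.getLast_append_of_ne_nil _ hne
      have hfuel : fl + 1 + pre.length = (fl + pre.length) + 1 := by omega
      rw [hfuel]
      by_cases hcond : PySem.List.pyGetD dp j 0 ≤
          PySem.List.pyGetD dp ((x :: tl).getLast hne) 0
      · rw [pvPopBack]
        rw [if_pos ⟨by simp, by rw [hlast]; exact hcond⟩]
        rw [List.dropLast_append_of_ne_nil hne]
        rw [ih (x :: tl).dropLast pre (by simp only [List.length_dropLast, List.length_cons]; simp at hlen; omega)]
        rw [pvPopT, if_pos hcond]
      · rw [pvPopBack]
        rw [if_neg (by rw [hlast]; tauto)]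
        rw [pvPopT, if_neg hcond]

lemma pvPopT_prefix (g : Int → Int) (vj : Int) :
    ∀ (tl : List Int), (pvPopT g vj tl) <+: tl := by
  intro tl
  induction tl using pvPopT.induct g vj with
  | case1 => rw [pvPopT]
  | case2 x tl hc ih =>
    rw [pvPopT, if_pos hc]
    exact ih.trans (List.dropLast_prefix _)
  | case3 x tl hc =>
    rw [pvPopT, if_neg hc]

lemma pv_mem_dropLast_or (l : List Int) (h : l ≠ []) (e : Int) (he : e ∈ l) :
    e ∈ l.dropLast ∨ e = l.getLast h := by
  have hd := List.dropLast_concat_getLast h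
  rw [← hd] at he
  rcases List.mem_append.1 he with h1 | h1
  · exact Or.inl h1
  · simp at h1
    exact Or.inr h1

lemma pvPopT_removed (g : Int → Int) (vj : Int) :
    ∀ (tl : List Int) (e : Int), e ∈ tl → e ∉ pvPopT g vj tl → vj ≤ g e := by
  intro tl
  induction tl using pvPopT.induct g vj with
  | case1 => intro e he _; cases he
  | case2 x tl hc ih =>
    intro e he hne
    rw [pvPopT, if_pos hc] at hne
    rcases pv_mem_dropLast_or (x :: tl) (by simp) e he with hd | hl
    · exact ih e hd hne
    · rw [hl]; exact hc
  | case3 x tl hc =>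
    intro e he hne
    rw [pvPopT, if_neg hc] at hne
    exact absurd he hne

lemma pvPopT_all_lt (g : Int → Int) (vj : Int) :
    ∀ (tl : List Int), tl.Pairwise (fun a b => g a < g b) →
      ∀ e ∈ pvPopT g vj tl, g e < vj := by
  intro tl
  induction tl using pvPopT.induct g vj with
  | case1 => intro _ e he; rw [pvPopT] at he; cases he
  | case2 x tl hc ih =>
    intro hp e he
    rw [pvPopT, if_pos hc] at he
    exact ih (hp.sublist (List.dropLast_sublist _)) e he
  | case3 x tl hc =>
    intro hp e he
    rw [pvPopT, if_neg hc] at he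
    rw [not_le] at hc
    rcases pv_mem_dropLast_or (x :: tl) (by simp) e he with hd | hl
    · have hrel : g e < g ((x :: tl).getLast (by simp)) := by
        have hdecomp := List.dropLast_concat_getLast (l := x :: tl) (by simp)
        have hp2 : ((x :: tl).dropLast ++ [(x :: tl).getLast (by simp)]).Pairwise
            (fun a b => g a < g b) := by rw [hdecomp]; exact hp
        exact (List.pairwise_append.1 hp2).2.2 e hd _ (by simp)
      exact hrel.trans hc
    · rw [hl]; exact hc

lemma pvGetD_append_len (pre : List Int) (y : Int) (ys : List Int) :
    PySem.List.pyGetD (pre ++ y :: ys) ((pre.length : Nat) : Int) 0 = y := by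
  simp [PySem.List.pyGetD]

lemma pvD_step_val (steps : List Int) (k : Int) (hk : 1 ≤ k) (t : Int) (ht1 : 1 ≤ t)
    (ht2 : t ≤ (steps.length : Int)) (ff : Int) (tl₁ rest₁ : List Int)
    (htl₁ : tl₁ = ff :: rest₁)
    (hp1 : tl₁.Pairwise (fun a b => b < a ∧ pvD steps k.toNat a < pvD steps k.toNat b))
    (hb1 : ∀ e ∈ tl₁, t ≤ e ∧ e ≤ t - 1 + k ∧ e ≤ (steps.length : Int))
    (hdom : ∀ jj : Int, t ≤ jj → jj ≤ t - 1 + k → jj ≤ (steps.length : Int) →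
      ∃ e ∈ tl₁, e ≤ jj ∧ pvD steps k.toNat e ≤ pvD steps k.toNat jj) :
    PySem.List.pyGetD steps (t - 1) 0 + pvD steps k.toNat ff = pvD steps k.toNat (t - 1) := by
  subst htl₁
  have hmin : ∀ e ∈ ff :: rest₁, pvD steps k.toNat ff ≤ pvD steps k.toNat e := by
    intro e he
    rcases List.mem_cons.1 he with rfl | he'
    · exact le_rfl
    · exact le_of_lt (List.rel_of_pairwise_cons hp1 he').2
  have hffb := hb1 ff List.mem_cons_self
  conv_rhs => rw [pvD]
  rw [dif_pos ⟨by omega, by omega⟩]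
  congr 1
  symm
  apply pvMinNE_eq
  · refine List.mem_map.2 ⟨(ff - t).toNat, List.mem_range.2 (by omega), ?_⟩
    rw [show t - 1 + 1 + (((ff - t).toNat : Nat) : Int) = ff by omega]
  · intro x hx
    obtain ⟨d, hd, rfl⟩ := List.mem_map.1 hx
    have hdK : (d : Int) ≤ k - 1 := by
      have := List.mem_range.1 hd
      omega
    by_cases hcase : t - 1 + 1 + (d : Int) ≤ (steps.length : Int)
    · obtain ⟨e, he, _, hde⟩ := hdom (t - 1 + 1 + (d : Int)) (by omega) (by omega) hcase
      exact (hmin e he).trans hde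
    · rw [pvD_zero_of_ge steps k.toNat (t - 1 + 1 + (d : Int)) (by omega)]
      obtain ⟨e, he, _, hde⟩ := hdom (steps.length : Int) (by omega) (by omega) le_rfl
      rw [pvD_zero_of_ge steps k.toNat _ le_rfl] at hde
      exact (hmin e he).trans hde

lemma pvSet_read (steps : List Int) (k : Int) (dp : List Int) (t : Int) (ht1 : 1 ≤ t)
    (ht2 : t ≤ (steps.length : Int)) (h1 : dp.length = steps.length + 1)
    (h2 : ∀ j : Int, t ≤ j → j ≤ (steps.length : Int) →
      PySem.List.pyGetD dp j 0 = pvD steps k.toNat j)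
    (v : Int) (hv : v = pvD steps k.toNat (t - 1)) :
    ∀ j : Int, t - 1 ≤ j → j ≤ (steps.length : Int) →
      PySem.List.pyGetD (PySem.List.pySetD dp (t - 1) v) j 0 = pvD steps k.toNat j := by
  intro j hj1 hj2
  have hidx : (t - 1) = (((t - 1).toNat : Nat) : Int) := by omega
  have hjj : j = ((j.toNat : Nat) : Int) := by omega
  rw [hidx, hjj, PySem.List.pyGetD_pySetD_natCast dp (t - 1).toNat j.toNat v 0 (by omega)]
  split_ifs with he
  · rw [hv]
    congr 1
    omega
  · exact h2 _ (by omega) (by omega)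

lemma pvStep_inv (steps : List Int) (k : Int) (hk : 1 ≤ k) (t : Int)
    (ht1 : 1 ≤ t) (ht2 : t ≤ (steps.length : Int)) (s : List Int × List Int × Nat)
    (h : pvInv steps k t s) : pvInv steps k (t - 1) (pvStep steps k s (t - 1)) := by
  obtain ⟨dp, dq, head⟩ := s
  obtain ⟨h1, h2, h3, h4, h5, h6⟩ := h
  have hj : t - 1 + 1 = t := by ring
  set pre := dq.take head with hpredef
  set tl := dq.drop head with htldef
  have hlenpre : pre.length = head := List.length_take_of_le h3
  have hsplit : pre ++ tl = dq := List.take_append_drop _ _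
  set tl' := pvPopT (fun e => PySem.List.pyGetD dp e 0) (PySem.List.pyGetD dp t 0) tl
    with htl'def
  have hpop : pvPopBack dp head t dq.length dq = pre ++ tl' := by
    have hh := pvPopBack_eq dp t tl.length tl pre le_rfl
    rw [hlenpre, hsplit] at hh
    rw [show dq.length = tl.length + head by
      conv_lhs => rw [← hsplit]
      simp [hlenpre]; omega]
    exact hh
  simp only [pvStep, hj, hpop]
  rw [List.append_assoc]
  obtain ⟨f, rest, hfr⟩ : ∃ f rest, tl' ++ [t] = f :: rest := by
    cases tl' <;> exact ⟨_, _, rfl⟩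
  rw [hfr]
  have hfront : PySem.List.pyGetD (pre ++ f :: rest) ((head : Nat) : Int) 0 = f := by
    rw [← hlenpre]
    exact pvGetD_append_len _ _ _
  rw [hfront]
  -- shared facts
  have hgD : ∀ e ∈ tl, PySem.List.pyGetD dp e 0 = pvD steps k.toNat e := by
    intro e he
    have h4e := h4 e he
    exact h2 e (by omega) h4e.2.2
  have hgt : PySem.List.pyGetD dp t 0 = pvD steps k.toNat t := h2 t le_rfl ht2
  have h5g : tl.Pairwise (fun a b => PySem.List.pyGetD dp a 0 < PySem.List.pyGetD dp b 0) := by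
    refine List.Pairwise.imp_of_mem ?_ h5
    intro a b ha hb hab
    rw [hgD a ha, hgD b hb]
    exact hab.2
  have hsub' : tl' <+: tl := by rw [htl'def]; exact pvPopT_prefix _ _ tl
  have hmem' : ∀ e ∈ tl', e ∈ tl := fun e he => hsub'.sublist.mem he
  have hlt' : ∀ e ∈ tl', pvD steps k.toNat e < pvD steps k.toNat t := by
    intro e he
    have hh : PySem.List.pyGetD dp e 0 < PySem.List.pyGetD dp t 0 :=
      pvPopT_all_lt _ _ tl h5g e (by rw [← htl'def]; exact he)
    rw [hgD e (hmem' e he), hgt] at hh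
    exact hh
  have hrem' : ∀ e ∈ tl, e ∉ tl' → pvD steps k.toNat t ≤ pvD steps k.toNat e := by
    intro e he hne
    have hh : PySem.List.pyGetD dp t 0 ≤ PySem.List.pyGetD dp e 0 :=
      pvPopT_removed _ _ tl e he (by rw [← htl'def]; exact hne)
    rw [hgD e he, hgt] at hh
    exact hh
  have hp0 : (f :: rest).Pairwise
      (fun a b => b < a ∧ pvD steps k.toNat a < pvD steps k.toNat b) := by
    rw [← hfr, List.pairwise_append]
    refine ⟨h5.sublist hsub'.sublist, by simp, ?_⟩
    intro a ha b hb
    simp only [List.mem_singleton] at hb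
    subst hb
    have h4a := h4 a (hmem' a ha)
    exact ⟨by omega, hlt' a ha⟩
  have hb0 : ∀ e ∈ f :: rest, t ≤ e ∧ e ≤ t + k ∧ e ≤ (steps.length : Int) := by
    intro e he
    rw [← hfr] at he
    rcases List.mem_append.1 he with h' | h'
    · have := h4 e (hmem' e h')
      exact ⟨by omega, this.2.1, this.2.2⟩
    · simp only [List.mem_singleton] at h'
      subst h'
      exact ⟨le_rfl, by omega, ht2⟩
  have hgD1 : ∀ e ∈ f :: rest, PySem.List.pyGetD dp e 0 = pvD steps k.toNat e := by
    intro e he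
    rw [← hfr] at he
    rcases List.mem_append.1 he with h' | h'
    · exact hgD e (hmem' e h')
    · simp only [List.mem_singleton] at h'
      subst h'
      exact hgt
  have htmem : t ∈ f :: rest := by
    rw [← hfr]
    exact List.mem_append.2 (Or.inr (by simp))
  by_cases hev : t - 1 + k < f
  · -- evict: head advances, live deque is `rest`
    rw [if_pos hev]
    have hft : f ≠ t := by
      intro hft
      omega
    have htmem1 : t ∈ rest := by
      rcases List.mem_cons.1 htmem with hh | hh
      · exact absurd hh.symm hft
      · exact hh
    obtain ⟨f2, rest2, hrr⟩ : ∃ f2 rest2, rest = f2 :: rest2 := by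
      cases rest with
      | nil => cases htmem1
      | cons a as => exact ⟨_, _, rfl⟩
    have hfront2 : PySem.List.pyGetD (pre ++ f :: rest) (((head + 1 : Nat)) : Int) 0 = f2 := by
      rw [hrr, show pre ++ f :: f2 :: rest2 = (pre ++ [f]) ++ f2 :: rest2 by simp,
        show (head + 1 : Nat) = (pre ++ [f]).length by simp [hlenpre]]
      exact pvGetD_append_len _ _ _
    have hdrop2 : (pre ++ f :: rest).drop (head + 1) = rest := by
      rw [show pre ++ f :: rest = (pre ++ [f]) ++ rest by simp,
        show (head + 1 : Nat) = (pre ++ [f]).length by simp [hlenpre]]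
      exact List.drop_left
    have hp1 : rest.Pairwise (fun a b => b < a ∧ pvD steps k.toNat a < pvD steps k.toNat b) :=
      (List.pairwise_cons.1 hp0).2
    have hrelf : ∀ b ∈ rest, b < f ∧ pvD steps k.toNat f < pvD steps k.toNat b :=
      (List.pairwise_cons.1 hp0).1
    have hb1 : ∀ e ∈ rest, t ≤ e ∧ e ≤ t - 1 + k ∧ e ≤ (steps.length : Int) := by
      intro e he
      have hbe := hb0 e (List.mem_cons_of_mem _ he)
      have hef : e < f := (hrelf e he).1
      have hfb := hb0 f List.mem_cons_self
      exact ⟨hbe.1, by omega, hbe.2.2⟩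
    have hdom1 : ∀ jj : Int, t ≤ jj → jj ≤ t - 1 + k → jj ≤ (steps.length : Int) →
        ∃ e ∈ rest, e ≤ jj ∧ pvD steps k.toNat e ≤ pvD steps k.toNat jj := by
      intro jj hjj1 hjj2 hjj3
      rcases eq_or_lt_of_le hjj1 with rfl | hlt
      · exact ⟨t, htmem1, le_rfl, le_rfl⟩
      · obtain ⟨e, he, he1, he2⟩ := h6 jj (by omega) (by omega) hjj3
        by_cases hin : e ∈ tl'
        · have hee : e ∈ f :: rest := by
            rw [← hfr]
            exact List.mem_append_left _ hin
          rcases List.mem_cons.1 hee with rfl | hr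
          · exfalso
            omega
          · exact ⟨e, hr, he1, he2⟩
        · exact ⟨t, htmem1, by omega, le_trans (hrem' e he hin) he2⟩
    have hval := pvD_step_val steps k hk t ht1 ht2 f2 rest rest2 hrr hp1 hb1 hdom1
    rw [hfront2, hgD1 f2 (by rw [hrr]; exact List.mem_cons_of_mem _ List.mem_cons_self)]
    refine ⟨?_, ?_, ?_, ?_, ?_, ?_⟩
    · simpa [PySem.List.length_pySetD] using h1
    · exact pvSet_read steps k dp t ht1 ht2 h1 h2 _ hval
    · simp only [List.length_append, List.length_cons, hlenpre]
      omega
    · intro e he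
      rw [hdrop2] at he
      have := hb1 e he
      exact ⟨by omega, by omega, this.2.2⟩
    · rw [hdrop2]
      exact hp1
    · intro jj hjj1 hjj2 hjj3
      rw [hdrop2]
      exact hdom1 jj (by omega) (by omega) hjj3
  · -- no eviction: live deque is f :: rest
    rw [if_neg hev, hfront,
      hgD1 f List.mem_cons_self]
    have hdrop1 : (pre ++ f :: rest).drop head = f :: rest := by
      rw [← hlenpre]
      exact List.drop_left
    have hb1 : ∀ e ∈ f :: rest, t ≤ e ∧ e ≤ t - 1 + k ∧ e ≤ (steps.length : Int) := by
      intro e he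
      have hbe := hb0 e he
      rcases List.mem_cons.1 he with rfl | hr
      · exact ⟨hbe.1, by omega, hbe.2.2⟩
      · have : e < f := ((List.pairwise_cons.1 hp0).1 e hr).1
        exact ⟨hbe.1, by omega, hbe.2.2⟩
    have hdom1 : ∀ jj : Int, t ≤ jj → jj ≤ t - 1 + k → jj ≤ (steps.length : Int) →
        ∃ e ∈ f :: rest, e ≤ jj ∧ pvD steps k.toNat e ≤ pvD steps k.toNat jj := by
      intro jj hjj1 hjj2 hjj3
      rcases eq_or_lt_of_le hjj1 with rfl | hlt
      · exact ⟨t, htmem, le_rfl, le_rfl⟩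
      · obtain ⟨e, he, he1, he2⟩ := h6 jj (by omega) (by omega) hjj3
        by_cases hin : e ∈ tl'
        · exact ⟨e, by rw [← hfr]; exact List.mem_append_left _ hin, he1, he2⟩
        · exact ⟨t, htmem, by omega, le_trans (hrem' e he hin) he2⟩
    have hval := pvD_step_val steps k hk t ht1 ht2 f (f :: rest) rest rfl hp0 hb1 hdom1
    refine ⟨?_, ?_, ?_, ?_, ?_, ?_⟩
    · simpa [PySem.List.length_pySetD] using h1
    · exact pvSet_read steps k dp t ht1 ht2 h1 h2 _ hval
    · simp only [List.length_append, List.length_cons, hlenpre]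
      omega
    · intro e he
      rw [hdrop1] at he
      have := hb1 e he
      exact ⟨by omega, by omega, this.2.2⟩
    · rw [hdrop1]
      exact hp0
    · intro jj hjj1 hjj2 hjj3
      rw [hdrop1]
      exact hdom1 jj (by omega) (by omega) hjj3

lemma pvRange_concat (a b : Int) (h : b ≤ a) :
    PySem.List.pyRange a (b - 1) (-1) = PySem.List.pyRange a b (-1) ++ [b] := by
  have h1 : (b - 1) + 1 = b := by ring
  rw [PySem.List.pyRange_neg_one_eq_reverse, h1, PySem.List.pyRange_one_cons (by omega),
    List.reverse_cons, PySem.List.pyRange_neg_one_eq_reverse]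

lemma pvInv_init (steps : List Int) (k : Int) :
    pvInv steps k (steps.length : Int) (List.replicate (steps.length + 1) (0 : Int), [], 0) := by
  unfold pvInv
  refine ⟨by simp, ?_, by simp, by simp, by simp, ?_⟩
  · intro j h1 h2
    have hj : j = (steps.length : Int) := le_antisymm h2 h1
    subst hj
    rw [pvD_zero_of_ge steps k.toNat _ le_rfl, PySem.List.pyGetD_of_nonneg]
    · simp
    · omega
  · intro j h1 h2 h3
    exfalso
    omega

lemma pvLoop (steps : List Int) (k : Int) (hk : 1 ≤ k) :
    ∀ (c : Nat), c ≤ steps.length →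
      pvInv steps k ((steps.length : Int) - c)
        ((PySem.List.pyRange ((steps.length : Int) - 1) (((steps.length : Int) - c) - 1) (-1)).foldl
          (pvStep steps k) (List.replicate (steps.length + 1) (0 : Int), [], 0)) := by
  intro c
  induction c with
  | zero =>
    intro _
    rw [PySem.List.pyRange_neg_one_eq_nil (by omega), List.foldl_nil]
    simpa using pvInv_init steps k
  | succ c ih =>
    intro hc
    have ihh := ih (by omega)
    have hb : ((steps.length : Int) - (c + 1 : Nat)) - 1
        = (((steps.length : Int) - c) - 1) - 1 := by push_cast; ring
    have hb2 : ((steps.length : Int) - c) - 1 = (steps.length : Int) - (c + 1 : Nat) := by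
      push_cast; ring
    rw [hb, pvRange_concat _ _ (by omega), List.foldl_append, List.foldl_cons, List.foldl_nil,
      ← hb2]
    exact pvStep_inv steps k hk ((steps.length : Int) - c) (by omega) (by omega) _ ihh

lemma pvB_eq (steps : List Int) (k : Int) (hk : 1 ≤ k) :
    minSumStairsWithHops_alt steps k = pvD steps k.toNat 0 := by
  have h := pvLoop steps k hk steps.length le_rfl
  have he : ((steps.length : Int) - (steps.length : Nat)) - 1 = -1 := by omega
  have he2 : (steps.length : Int) - (steps.length : Nat) = 0 := by omega
  rw [he, he2] at h
  exact h.2.1 0 le_rfl (by omega)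

lemma pvB_nil (k : Int) : minSumStairsWithHops_alt [] k = 0 := by
  show PySem.List.pyGetD
      ((PySem.List.pyRange ((0 : Int) - 1) (-1) (-1)).foldl (pvStep [] k)
        (List.replicate 1 (0 : Int), [], 0)).1 0 0 = 0
  rw [show ((0 : Int) - 1) = -1 by norm_num, PySem.List.pyRange_neg_one_eq_nil le_rfl,
    List.foldl_nil]
  rfl

-- ===== VERDICT (by name: the statement is the Claim_ definition above) =====
theorem minSumStairsWithHops_spec : Claim_equal_minSumStairsWithHops := by
  intro steps k _hdom hpre
  unfold Spec_minSumStairsWithHops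
  rcases hpre with rfl | hk
  · rw [pvA_nil, pvB_nil]
  · rw [pvA_eq steps k hk, pvB_eq steps k hk]
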